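-- pv_equiv track=rewrite | github.com/gabradle7/Random | WTF.py | placement
-- ===== SOURCE A (Python) =====
-- def placement(student):
--     group1_count = 0
--     group2_count = 0
--     groups = []
--     for i in range(1, student+1):
--         if i % 2 == 0:
--             groups.append(1)
--             group1_count += 1
--         else:
--             groups.append(2)
--             group2_count += 1
--     return groups, group1_count, group2_count
-- ===== SOURCE B (Python) =====
-- def placement(student):
--     groups = [2 if i % 2 else 1 for i in range(1, student + 1)]
--     n = max(student, 0)
--     group1_count = n // 2
--     group2_count = n - n // 2
--     return groups, group1_count, group2_count
-- ===== Notes on version B (the rewrite author's own statement) =====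
-- stated objective: simpler
-- what changed: The loop no longer maintains counters: groups come from a single comprehension and the two counts are computed in closed form (n//2 and n-n//2) from the clamped student count.
import Mathlib
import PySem

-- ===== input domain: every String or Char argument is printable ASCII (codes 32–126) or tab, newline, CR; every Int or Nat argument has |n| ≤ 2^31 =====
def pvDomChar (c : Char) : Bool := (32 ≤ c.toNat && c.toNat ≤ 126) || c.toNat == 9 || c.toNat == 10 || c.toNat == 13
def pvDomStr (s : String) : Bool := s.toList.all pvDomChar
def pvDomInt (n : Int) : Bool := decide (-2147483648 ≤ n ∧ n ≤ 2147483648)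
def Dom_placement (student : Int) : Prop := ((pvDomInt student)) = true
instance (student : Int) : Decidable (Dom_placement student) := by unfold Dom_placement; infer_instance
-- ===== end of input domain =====

-- B replaces the counter-maintaining loop by a comprehension plus closed-form counts (n//2, n-n//2); objective: simpler.

-- ===== PORT A =====
-- state = (group1_count, group2_count, groups), exactly A's three accumulators
def placement (student : Int) : List Int × Int × Int :=
  let st := (PySem.List.pyRange 1 (student + 1) 1).foldl
    (fun (st : Int × Int × List Int) i =>
      if PySem.Int.mod i 2 = 0 then (st.1 + 1, st.2.1, st.2.2 ++ [1])
      else (st.1, st.2.1 + 1, st.2.2 ++ [2]))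
    (0, 0, [])
  (st.2.2, st.1, st.2.1)

-- ===== PORT B =====
def placement_alt (student : Int) : List Int × Int × Int :=
  let groups := (PySem.List.pyRange 1 (student + 1) 1).map
    (fun i => if PySem.Int.mod i 2 ≠ 0 then (2 : Int) else 1)
  let n := max student 0
  let group1_count := PySem.Int.floordiv n 2
  let group2_count := n - PySem.Int.floordiv n 2
  (groups, group1_count, group2_count)

-- ===== PRECONDITION & SPEC =====
def Spec_placement (student : Int) (out : List Int × Int × Int) : Prop := out = placement_alt student
instance (student : Int) (out : List Int × Int × Int) : Decidable (Spec_placement student out) := by unfold Spec_placement; infer_instance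

-- ===== CLAIM (what is proved, stated in full; the proofs are below) =====
def Claim_equal_placement : Prop := ∀ (student : Int), Dom_placement student → Spec_placement student (placement student)

-- ===== LEMMAS AND PROOFS =====

-- A's loop over 1..n computed in closed form: counts are n/2 and (n+1)/2, groups are the pointwise map.
lemma placement_loop_eq (n : Nat) :
    (PySem.List.pyRange 1 ((n : Int) + 1) 1).foldl
      (fun (st : Int × Int × List Int) i =>
        if PySem.Int.mod i 2 = 0 then (st.1 + 1, st.2.1, st.2.2 ++ [1])
        else (st.1, st.2.1 + 1, st.2.2 ++ [2]))
      (0, 0, [])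
    = (((n / 2 : Nat) : Int), (((n + 1) / 2 : Nat) : Int),
       (PySem.List.pyRange 1 ((n : Int) + 1) 1).map
         (fun i => if PySem.Int.mod i 2 ≠ 0 then (2 : Int) else 1)) := by
  induction n with
  | zero => simp [PySem.List.pyRange_one_eq_nil]
  | succ m ih =>
    have hstep : PySem.List.pyRange 1 ((↑(m + 1) : Int) + 1) 1
        = PySem.List.pyRange 1 ((m : Int) + 1) 1 ++ [(m : Int) + 1] := by
      have := PySem.List.pyRange_one_succ_right (a := 1) (b := (m : Int) + 1) (by omega)
      push_cast
      simpa using this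
    rw [hstep, List.foldl_append, ih, List.map_append]
    have hmod : PySem.Int.mod ((m : Int) + 1) 2 = (((m + 1) % 2 : Nat) : Int) := by
      have := PySem.Int.mod_natCast (m + 1) 2
      push_cast at this ⊢
      omega
    by_cases h : (m + 1) % 2 = 0
    · simp only [hmod, h, List.map]
      norm_num
      rw [if_pos (by omega : (2:Int) ∣ (m:Int) + 1)]
      simp only [Prod.mk.injEq]
      refine ⟨by omega, by omega, by trivial⟩
    · simp only [hmod, List.map]
      norm_num
      rw [if_neg (by omega : ¬ (2:Int) ∣ (m:Int) + 1)]
      rw [if_pos (by omega : ((m:Int) + 1) % 2 = 1)]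
      simp only [Prod.mk.injEq]
      refine ⟨by omega, by omega, by trivial⟩

-- ===== VERDICT (by name: the statement is the Claim_ definition above) =====
theorem placement_spec : Claim_equal_placement := by
  intro student _
  unfold Spec_placement placement placement_alt
  by_cases h : student ≤ 0
  · rw [PySem.List.pyRange_one_eq_nil (by omega)]
    have hmax : max student 0 = 0 := by omega
    simp [hmax, PySem.Int.floordiv]
  · obtain ⟨n, rfl⟩ : ∃ n : Nat, student = (n : Int) :=
      ⟨student.toNat, by omega⟩
    rw [placement_loop_eq n]
    have hmax : max (n : Int) 0 = (n : Int) := by omega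
    have hdiv : PySem.Int.floordiv (n : Int) 2 = ((n / 2 : Nat) : Int) := by
      exact_mod_cast PySem.Int.floordiv_natCast n 2
    simp only [hmax, hdiv, Prod.mk.injEq]
    refine ⟨by trivial, by trivial, by omega⟩
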